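-- pv_equiv track=rewrite | github.com/Alaxouche/MO2-Modular-Dashboard | Data/plugins.py | _insert_relative_once
-- ===== SOURCE A (Python) =====
-- from typing import Dict, List, Optional, Set, Tuple
--
-- def _plugin_ext_rank(name: str) -> int:
--     n = (name or "").lower()
--     if n.endswith(".esm"): return 0
--     if n.endswith(".esp"): return 1
--     if n.endswith(".esl"): return 2
--     return 3
--
-- def _partition_by_ext(order: List[str]) -> Dict[int, List[str]]:
--     buckets = {0: [], 1: [], 2: [], 3: []}
--     for n in order:
--         buckets[_plugin_ext_rank(n)].append(n)
--     return buckets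
--
-- def _merge_buckets(bk: Dict[int, List[str]]) -> List[str]:
--     return bk[0] + bk[1] + bk[2] + bk[3]
--
-- def _insert_relative_once(current_order: List[str],
--                           plugin: str,
--                           anchor: Optional[str],
--                           position: str) -> List[str]:
--     order = [n for n in current_order if n.strip().lower() != plugin.strip().lower()]
--     pr = _plugin_ext_rank(plugin)
--     bk = _partition_by_ext(order)
--     tgt = bk.get(pr, [])
--     if anchor:
--         try:
--             if _plugin_ext_rank(anchor) == pr:
--                 idx = next(i for i, n in enumerate(tgt) if n.strip().lower() == anchor.strip().lower())
--                 tgt.insert(idx if position.lower()=="before" else idx+1, plugin)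
--             else:
--                 tgt.append(plugin)
--         except StopIteration:
--             tgt.append(plugin)
--     else:
--         tgt.append(plugin)
--     bk[pr] = tgt
--     return _merge_buckets(bk)
-- ===== SOURCE B (Python) =====
-- def _plugin_ext_rank(name: str) -> int:
--     n = (name or "").lower()
--     if n.endswith(".esm"): return 0
--     if n.endswith(".esp"): return 1
--     if n.endswith(".esl"): return 2
--     return 3
--
-- def _insert_relative_once(current_order, plugin, anchor, position):
--     key = plugin.strip().lower()
--     order = [n for n in current_order if n.strip().lower() != key]
--     pr = _plugin_ext_rank(plugin)
--     pos = len(order)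
--     if anchor and _plugin_ext_rank(anchor) == pr:
--         ak = anchor.strip().lower()
--         for i, n in enumerate(order):
--             if _plugin_ext_rank(n) == pr and n.strip().lower() == ak:
--                 pos = i if position.lower() == "before" else i + 1
--                 break
--     order.insert(pos, plugin)
--     return sorted(order, key=_plugin_ext_rank)
-- ===== Notes on version B (the rewrite author's own statement) =====
-- stated objective: simpler
-- what changed: Replaces the four-bucket dict partition, bucket-local insert and bucket re-merge by a single flat insert next to the first matching rank-peer followed by one stable sort on the extension rank; the plugin/anchor strip().lower() normalizations are computed once instead of once per compared element.
import Mathlib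
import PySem

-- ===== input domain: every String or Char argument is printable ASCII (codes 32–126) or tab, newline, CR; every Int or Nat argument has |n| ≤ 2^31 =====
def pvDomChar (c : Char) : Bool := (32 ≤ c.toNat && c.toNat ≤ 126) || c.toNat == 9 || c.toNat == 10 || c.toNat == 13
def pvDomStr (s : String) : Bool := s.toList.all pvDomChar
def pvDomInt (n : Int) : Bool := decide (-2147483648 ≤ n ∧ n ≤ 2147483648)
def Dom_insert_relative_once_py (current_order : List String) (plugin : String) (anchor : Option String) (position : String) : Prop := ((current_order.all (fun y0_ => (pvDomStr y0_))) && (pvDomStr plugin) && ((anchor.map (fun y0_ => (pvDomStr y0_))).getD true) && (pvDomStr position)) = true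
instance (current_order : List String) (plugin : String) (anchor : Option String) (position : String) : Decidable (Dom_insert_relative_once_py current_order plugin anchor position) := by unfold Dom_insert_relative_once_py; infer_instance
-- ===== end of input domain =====

-- B replaces A's four-way dict partition / bucket re-merge by one conditional flat insert followed by
-- a stable sort on the extension rank (objective: simpler — no dict, no bucket bookkeeping).

-- ===== PORT A =====
-- _plugin_ext_rank (shared module helper; `(name or "")` equals `name` on a str argument — `or ""` only guards None)
def pvRank (name : String) : Int :=
  let n := PySem.Str.lower name
  if PySem.Str.endswith n ".esm" then 0
  else if PySem.Str.endswith n ".esp" then 1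
  else if PySem.Str.endswith n ".esl" then 2
  else 3

-- n.strip().lower(), the comparison key both versions use
def pvKey (s : String) : String := PySem.Str.lower (PySem.Str.strip s)

-- literal port of _insert_relative_once (the dict `{0:[],1:[],2:[],3:[]}` filled by _partition_by_ext's
-- loop; _merge_buckets reads bk[0..3] — keys 0..3 are always present, so getD is exact)
def insert_relative_once_py (current_order : List String) (plugin : String) (anchor : Option String) (position : String) : List String :=
  let order := current_order.filter (fun n => pvKey n != pvKey plugin)
  let pr := pvRank plugin
  let bk := order.foldl (fun d n => d.modify (pvRank n) [] (fun t => t ++ [n]))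
      (PySem.Dict.ofList [((0 : Int), ([] : List String)), (1, []), (2, []), (3, [])])
  let tgt := bk.getD pr []
  let tgt' :=
    match anchor with
    | some a =>
      if a ≠ "" then
        if pvRank a = pr then
          match (PySem.List.enumerate tgt 0).find? (fun p => pvKey p.2 == pvKey a) with
          | some (i, _) =>
              PySem.List.insert tgt (if PySem.Str.lower position = "before" then i else i + 1) plugin
          | none => tgt ++ [plugin]
        else tgt ++ [plugin]
      else tgt ++ [plugin]
    | none => tgt ++ [plugin]
  let bk' := bk.insert pr tgt'
  bk'.getD 0 [] ++ bk'.getD 1 [] ++ bk'.getD 2 [] ++ bk'.getD 3 []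

-- ===== PORT B =====
-- Source B's `for i, n in enumerate(order): … break` loop: flat index of the first rank-pr name keyed ak
def pvFindMatch (pr : Int) (ak : String) : List String → Int → Option Int
  | [], _ => none
  | n :: rest, i => if pvRank n = pr ∧ pvKey n = ak then some i else pvFindMatch pr ak rest (i + 1)

def insert_relative_once_py_alt (current_order : List String) (plugin : String) (anchor : Option String) (position : String) : List String :=
  let order := current_order.filter (fun n => pvKey n != pvKey plugin)
  let pr := pvRank plugin
  let pos : Int :=
    match anchor with
    | some a =>
      if a ≠ "" ∧ pvRank a = pr then
        match pvFindMatch pr (pvKey a) order 0 with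
        | some i => if PySem.Str.lower position = "before" then i else i + 1
        | none => (order.length : Int)
      else (order.length : Int)
    | none => (order.length : Int)
  PySem.List.sorted (PySem.List.insert order pos plugin) (fun n => pvRank n)

-- ===== PRECONDITION & SPEC =====
def Spec_insert_relative_once_py (current_order : List String) (plugin : String) (anchor : Option String) (position : String) (out : List String) : Prop := out = insert_relative_once_py_alt current_order plugin anchor position
instance (current_order : List String) (plugin : String) (anchor : Option String) (position : String) (out : List String) : Decidable (Spec_insert_relative_once_py current_order plugin anchor position out) := by unfold Spec_insert_relative_once_py; infer_instance

-- ===== CLAIM (what is proved, stated in full; the proofs are below) =====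
def Claim_equal_insert_relative_once_py : Prop := ∀ (current_order : List String) (plugin : String) (anchor : Option String) (position : String), Dom_insert_relative_once_py current_order plugin anchor position → Spec_insert_relative_once_py current_order plugin anchor position (insert_relative_once_py current_order plugin anchor position)

-- ===== LEMMAS AND PROOFS =====

-- the rank-i elements of a list, in order
def pvFilt (i : Int) (l : List String) : List String := l.filter (fun n => decide (pvRank n = i))

theorem pvRank_cases (s : String) : pvRank s = 0 ∨ pvRank s = 1 ∨ pvRank s = 2 ∨ pvRank s = 3 := by
  simp only [pvRank]
  split_ifs <;> simp

-- the bucket dict: each key holds exactly its rank's elements, in order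
theorem pv_bk_getD (l : List String) (d : PySem.Dict Int (List String)) (i : Int) :
    (l.foldl (fun d n => d.modify (pvRank n) [] (fun t => t ++ [n])) d).getD i []
      = d.getD i [] ++ pvFilt i l := by
  induction l generalizing d with
  | nil => simp [pvFilt]
  | cons n t ih =>
    simp only [List.foldl_cons]
    rw [ih]
    by_cases h : pvRank n = i
    · subst h
      rw [PySem.Dict.getD_modify_self]
      simp [pvFilt]
    · rw [PySem.Dict.getD_modify_of_ne _ _ _ (Ne.symm h)]
      simp [pvFilt, h]

theorem pv_init_getD (i : Int) :
    (PySem.Dict.ofList [((0 : Int), ([] : List String)), (1, []), (2, []), (3, [])]).getD i [] = [] := by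
  have h : (PySem.Dict.ofList [((0 : Int), ([] : List String)), (1, []), (2, []), (3, [])])
      = ((((PySem.Dict.empty.insert (0 : Int) ([] : List String)).insert 1 []).insert 2 []).insert 3 []) := by
    rfl
  rw [h]
  simp only [PySem.Dict.getD_insert, PySem.Dict.getD_empty]
  split_ifs <;> rfl

theorem pv_insertBy_skip (before : String → String → Bool) (x : String) (ys zs : List String)
    (h : ∀ y ∈ ys, before x y = false) :
    PySem.List.insertBy before x (ys ++ zs) = ys ++ PySem.List.insertBy before x zs := by
  induction ys with
  | nil => simp
  | cons y ys ih =>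
    have hy : before x y = false := h y (by simp)
    simp [PySem.List.insertBy, hy, ih (fun z hz => h z (by simp [hz]))]

theorem pv_insertBy_all_before (before : String → String → Bool) (x : String) (zs : List String)
    (h : ∀ y ∈ zs, before x y = true) :
    PySem.List.insertBy before x zs = x :: zs := by
  cases zs with
  | nil => rfl
  | cons z zs => simp [PySem.List.insertBy, h z (by simp)]

theorem pv_foldl_insertBy (l : List String) : ∀ (F0 F1 F2 F3 : List String),
    (∀ y ∈ F0, pvRank y = 0) → (∀ y ∈ F1, pvRank y = 1) →
    (∀ y ∈ F2, pvRank y = 2) → (∀ y ∈ F3, pvRank y = 3) →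
    l.foldl (fun acc x => PySem.List.insertBy (fun a b => decide (pvRank a < pvRank b)) x acc)
        (F0 ++ F1 ++ F2 ++ F3)
      = (F0 ++ pvFilt 0 l) ++ (F1 ++ pvFilt 1 l) ++ (F2 ++ pvFilt 2 l) ++ (F3 ++ pvFilt 3 l) := by
  induction l with
  | nil => intro F0 F1 F2 F3 _ _ _ _; simp [pvFilt]
  | cons x t ih =>
    intro F0 F1 F2 F3 h0 h1 h2 h3
    simp only [List.foldl_cons]
    rcases pvRank_cases x with h | h | h | h
    · have hstep : PySem.List.insertBy (fun a b => decide (pvRank a < pvRank b)) x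
          (F0 ++ F1 ++ F2 ++ F3) = (F0 ++ [x]) ++ F1 ++ F2 ++ F3 := by
        have e : F0 ++ F1 ++ F2 ++ F3 = F0 ++ (F1 ++ F2 ++ F3) := by simp
        rw [e, pv_insertBy_skip _ _ _ _ (fun y hy => by simp [h, h0 y hy]),
          pv_insertBy_all_before _ _ _ (fun y hy => by
            have : pvRank y = 1 ∨ pvRank y = 2 ∨ pvRank y = 3 := by
              simp only [List.mem_append] at hy
              rcases hy with (hy | hy) | hy
              exacts [Or.inl (h1 y hy), Or.inr (Or.inl (h2 y hy)), Or.inr (Or.inr (h3 y hy))]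
            rcases this with h' | h' | h' <;> simp [h, h'])]
        simp
      rw [hstep, ih (F0 ++ [x]) F1 F2 F3
        (fun y hy => by
          rcases List.mem_append.1 hy with hy | hy
          · exact h0 y hy
          · simpa [List.mem_singleton.1 hy] using h) h1 h2 h3]
      simp [pvFilt, List.filter_cons, h]
    · have hstep : PySem.List.insertBy (fun a b => decide (pvRank a < pvRank b)) x
          (F0 ++ F1 ++ F2 ++ F3) = F0 ++ (F1 ++ [x]) ++ F2 ++ F3 := by
        have e : F0 ++ F1 ++ F2 ++ F3 = (F0 ++ F1) ++ (F2 ++ F3) := by simp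
        rw [e, pv_insertBy_skip _ _ _ _ (fun y hy => by
            rcases List.mem_append.1 hy with hy | hy
            · simp [h, h0 y hy]
            · simp [h, h1 y hy]),
          pv_insertBy_all_before _ _ _ (fun y hy => by
            rcases List.mem_append.1 hy with hy | hy
            · simp [h, h2 y hy]
            · simp [h, h3 y hy])]
        simp
      rw [hstep, ih F0 (F1 ++ [x]) F2 F3 h0
        (fun y hy => by
          rcases List.mem_append.1 hy with hy | hy
          · exact h1 y hy
          · simpa [List.mem_singleton.1 hy] using h) h2 h3]
      simp [pvFilt, List.filter_cons, h]
    · have hstep : PySem.List.insertBy (fun a b => decide (pvRank a < pvRank b)) x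
          (F0 ++ F1 ++ F2 ++ F3) = F0 ++ F1 ++ (F2 ++ [x]) ++ F3 := by
        have e : F0 ++ F1 ++ F2 ++ F3 = (F0 ++ F1 ++ F2) ++ F3 := by simp
        rw [e, pv_insertBy_skip _ _ _ _ (fun y hy => by
            rcases List.mem_append.1 hy with hy | hy
            · rcases List.mem_append.1 hy with hy | hy
              · simp [h, h0 y hy]
              · simp [h, h1 y hy]
            · simp [h, h2 y hy]),
          pv_insertBy_all_before _ _ _ (fun y hy => by simp [h, h3 y hy])]
        simp
      rw [hstep, ih F0 F1 (F2 ++ [x]) F3 h0 h1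
        (fun y hy => by
          rcases List.mem_append.1 hy with hy | hy
          · exact h2 y hy
          · simpa [List.mem_singleton.1 hy] using h) h3]
      simp [pvFilt, List.filter_cons, h]
    · have hstep : PySem.List.insertBy (fun a b => decide (pvRank a < pvRank b)) x
          (F0 ++ F1 ++ F2 ++ F3) = F0 ++ F1 ++ F2 ++ (F3 ++ [x]) := by
        rw [PySem.List.insertBy_of_forall_not_before _ _ _ (fun y hy => by
          have : pvRank y = 0 ∨ pvRank y = 1 ∨ pvRank y = 2 ∨ pvRank y = 3 := by
            simp only [List.mem_append] at hy
            rcases hy with ((hy | hy) | hy) | hy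
            exacts [Or.inl (h0 y hy), Or.inr (Or.inl (h1 y hy)),
              Or.inr (Or.inr (Or.inl (h2 y hy))), Or.inr (Or.inr (Or.inr (h3 y hy)))]
          rcases this with h' | h' | h' | h' <;> simp [h, h'])]
        simp
      rw [hstep, ih F0 F1 F2 (F3 ++ [x]) h0 h1 h2
        (fun y hy => by
          rcases List.mem_append.1 hy with hy | hy
          · exact h3 y hy
          · simpa [List.mem_singleton.1 hy] using h)]
      simp [pvFilt, List.filter_cons, h]

-- stable sort on pvRank = concatenation of the four rank buckets
theorem pv_sorted_buckets (l : List String) :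
    PySem.List.sorted l (fun n => pvRank n)
      = pvFilt 0 l ++ pvFilt 1 l ++ pvFilt 2 l ++ pvFilt 3 l := by
  rw [PySem.List.sorted_eq_foldl_insertBy]
  simpa using pv_foldl_insertBy l [] [] [] []
    (by simp) (by simp) (by simp) (by simp)

theorem pvFindMatch_none {pr : Int} {ak : String} : ∀ (l : List String) (s : Int),
    pvFindMatch pr ak l s = none → ∀ n ∈ l, ¬(pvRank n = pr ∧ pvKey n = ak) := by
  intro l
  induction l with
  | nil => intro s _ n hn; cases hn
  | cons n t ih =>
    intro s h m hm
    by_cases hc : pvRank n = pr ∧ pvKey n = ak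
    · simp [pvFindMatch, hc] at h
    · rw [pvFindMatch, if_neg hc] at h
      rcases List.mem_cons.1 hm with rfl | hm'
      · exact hc
      · exact ih (s + 1) h m hm'

theorem pvFindMatch_some {pr : Int} {ak : String} : ∀ (l : List String) (s i : Int),
    pvFindMatch pr ak l s = some i →
    ∃ t n0 r, l = t ++ n0 :: r ∧ i = s + t.length ∧
      (∀ y ∈ t, ¬(pvRank y = pr ∧ pvKey y = ak)) ∧ pvRank n0 = pr ∧ pvKey n0 = ak := by
  intro l
  induction l with
  | nil => intro s i h; simp [pvFindMatch] at h
  | cons n t ih =>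
    intro s i h
    by_cases hc : pvRank n = pr ∧ pvKey n = ak
    · rw [pvFindMatch, if_pos hc] at h
      exact ⟨[], n, t, by simp, by simpa using (Option.some.inj h).symm,
        by simp, hc.1, hc.2⟩
    · rw [pvFindMatch, if_neg hc] at h
      obtain ⟨t', n0, r, rfl, hi, hmem, hr0, hk0⟩ := ih (s + 1) i h
      refine ⟨n :: t', n0, r, rfl, ?_, ?_, hr0, hk0⟩

      · rw [hi]; simp only [List.length_cons]; push_cast; ring
      · intro y hy
        rcases List.mem_cons.1 hy with rfl | hy'
        · exact hc
        · exact hmem y hy'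

theorem pv_find_enum (ak n0 : String) (v : List String) : ∀ (u : List String) (s : Int),
    (∀ y ∈ u, pvKey y ≠ ak) → pvKey n0 = ak →
    (PySem.List.enumerate (u ++ n0 :: v) s).find? (fun p => pvKey p.2 == ak)
      = some (s + u.length, n0) := by
  intro u
  induction u with
  | nil =>
    intro s _ hn0
    simp [PySem.List.enumerate_cons, List.find?_cons, hn0]
  | cons y u ih =>
    intro s h hn0
    have hy : (pvKey y == ak) = false := by
      simpa using h y (by simp)
    simp only [List.cons_append, PySem.List.enumerate_cons]
    rw [List.find?_cons_of_neg (by simp [hy]), ih (s + 1) (fun z hz => h z (by simp [hz])) hn0]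
    have e : s + (((y :: u).length : Nat) : Int) = s + 1 + (u.length : Int) := by
      simp only [List.length_cons]; push_cast; ring
    rw [e]

-- python list.insert in the middle of a decomposed list
theorem pv_insert_mid (u l : List String) (x : String) :
    PySem.List.insert (u ++ l) (u.length : Int) x = u ++ x :: l := by
  have h := PySem.List.insert_natCast (u ++ l) u.length x (by simp)
  simpa [List.take_left, List.drop_left] using h

-- the Source B shape for the "append" case, expressed as A's four buckets
theorem pv_out_append (O : List String) (x : String) :
    PySem.List.sorted (PySem.List.insert O (O.length : Int) x) (fun n => pvRank n)
      = (if (0 : Int) = pvRank x then pvFilt 0 O ++ [x] else pvFilt 0 O)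
        ++ (if (1 : Int) = pvRank x then pvFilt 1 O ++ [x] else pvFilt 1 O)
        ++ (if (2 : Int) = pvRank x then pvFilt 2 O ++ [x] else pvFilt 2 O)
        ++ (if (3 : Int) = pvRank x then pvFilt 3 O ++ [x] else pvFilt 3 O) := by
  rw [PySem.List.insert_length, pv_sorted_buckets]
  rcases pvRank_cases x with h | h | h | h <;>
    simp [pvFilt, List.filter_append, List.filter_cons, h]

-- ===== MAIN =====

theorem pv_core (O : List String) (plugin : String) (anchor : Option String) (position : String) :
    (let pr := pvRank plugin
     let bk := O.foldl (fun d n => d.modify (pvRank n) [] (fun t => t ++ [n]))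
        (PySem.Dict.ofList [((0 : Int), ([] : List String)), (1, []), (2, []), (3, [])])
     let tgt := bk.getD pr []
     let tgt' :=
       match anchor with
       | some a =>
         if a ≠ "" then
           if pvRank a = pr then
             match (PySem.List.enumerate tgt 0).find? (fun p => pvKey p.2 == pvKey a) with
             | some (i, _) =>
                 PySem.List.insert tgt (if PySem.Str.lower position = "before" then i else i + 1) plugin
             | none => tgt ++ [plugin]
           else tgt ++ [plugin]
         else tgt ++ [plugin]
       | none => tgt ++ [plugin]
     let bk' := bk.insert pr tgt'
     bk'.getD 0 [] ++ bk'.getD 1 [] ++ bk'.getD 2 [] ++ bk'.getD 3 [])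
    = (let pr := pvRank plugin
       let pos : Int :=
         match anchor with
         | some a =>
           if a ≠ "" ∧ pvRank a = pr then
             match pvFindMatch pr (pvKey a) O 0 with
             | some i => if PySem.Str.lower position = "before" then i else i + 1
             | none => (O.length : Int)
           else (O.length : Int)
         | none => (O.length : Int)
       PySem.List.sorted (PySem.List.insert O pos plugin) (fun n => pvRank n)) := by
  have hbk : ∀ i, (O.foldl (fun d n => d.modify (pvRank n) [] (fun t => t ++ [n]))
      (PySem.Dict.ofList [((0 : Int), ([] : List String)), (1, []), (2, []), (3, [])])).getD i []
        = pvFilt i O := by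
    intro i; rw [pv_bk_getD, pv_init_getD]; rfl
  simp only [hbk, PySem.Dict.getD_insert]
  -- the generic "append at the end" goal, reached by four of the five branches
  have happend :
      (if (0 : Int) = pvRank plugin then pvFilt (pvRank plugin) O ++ [plugin] else pvFilt 0 O)
        ++ (if (1 : Int) = pvRank plugin then pvFilt (pvRank plugin) O ++ [plugin] else pvFilt 1 O)
        ++ (if (2 : Int) = pvRank plugin then pvFilt (pvRank plugin) O ++ [plugin] else pvFilt 2 O)
        ++ (if (3 : Int) = pvRank plugin then pvFilt (pvRank plugin) O ++ [plugin] else pvFilt 3 O)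
      = PySem.List.sorted (PySem.List.insert O (O.length : Int) plugin) (fun n => pvRank n) := by
    rw [pv_out_append]
    rcases pvRank_cases plugin with h | h | h | h <;> simp [h]
  rcases anchor with _ | a
  · exact happend
  · by_cases ha : a = ""
    · simp only [ha, ne_eq, not_true_eq_false, if_false, false_and]
      exact happend
    · by_cases har : pvRank a = pvRank plugin
      · simp only [ha, ne_eq, not_false_eq_true, if_true, har, and_self, if_pos]
        rcases hfm : pvFindMatch (pvRank plugin) (pvKey a) O 0 with _ | i
        · -- no match: both append
          have hnone : (PySem.List.enumerate (pvFilt (pvRank plugin) O) 0).find?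
              (fun p => pvKey p.2 == pvKey a) = none := by
            rw [List.find?_eq_none]
            intro p hp
            have hp2 : p.2 ∈ pvFilt (pvRank plugin) O := by
              rcases (PySem.List.mem_enumerate_iff _ _ p).1 hp with ⟨k, hk, rfl⟩
              exact List.getElem_mem hk
            have hr : pvRank p.2 = pvRank plugin := by
              have := List.of_mem_filter hp2
              simpa using this
            have hmem : p.2 ∈ O := List.mem_of_mem_filter hp2
            have := pvFindMatch_none O 0 hfm p.2 hmem
            simp only [hr, true_and] at this
            simp [this]
          rw [hnone]
          exact happend
        · -- matched: insert next to the anchor occurrence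
          obtain ⟨t, n0, r, rfl, hi, hmem, hr0, hk0⟩ := pvFindMatch_some _ 0 i hfm
          have htgt : pvFilt (pvRank plugin) (t ++ n0 :: r)
              = pvFilt (pvRank plugin) t ++ n0 :: pvFilt (pvRank plugin) r := by
            simp [pvFilt, List.filter_append, List.filter_cons, hr0]
          have hfind : (PySem.List.enumerate (pvFilt (pvRank plugin) (t ++ n0 :: r)) 0).find?
              (fun p => pvKey p.2 == pvKey a)
                = some (0 + (((pvFilt (pvRank plugin) t).length : Nat) : Int), n0) := by
            rw [htgt]
            refine pv_find_enum (pvKey a) n0 _ (pvFilt (pvRank plugin) t) 0 ?_ hk0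
            intro y hy
            have hr : pvRank y = pvRank plugin := by
              simpa using List.of_mem_filter hy
            have := hmem y (List.mem_of_mem_filter hy)
            simp only [hr, true_and] at this
            exact this
          rw [hfind, htgt]
          have hI : i = (t.length : Int) := by rw [hi]; ring
          by_cases hbef : PySem.Str.lower position = "before"
          · simp only [hbef, if_true, hI]
            have hA : PySem.List.insert
                (pvFilt (pvRank plugin) t ++ n0 :: pvFilt (pvRank plugin) r)
                (0 + ((pvFilt (pvRank plugin) t).length : Int)) plugin
                = pvFilt (pvRank plugin) t ++ plugin :: n0 :: pvFilt (pvRank plugin) r := by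
              rw [show (0 + ((pvFilt (pvRank plugin) t).length : Int))
                  = ((pvFilt (pvRank plugin) t).length : Int) by ring]
              exact pv_insert_mid _ _ _
            have hB : PySem.List.insert (t ++ n0 :: r) (t.length : Int) plugin
                = t ++ plugin :: n0 :: r := pv_insert_mid _ _ _
            rw [hA, hB, pv_sorted_buckets]
            rcases pvRank_cases plugin with h | h | h | h <;>
              simp [pvFilt, List.filter_append, List.filter_cons, h, hr0.trans h]
          · simp only [hbef, if_false, hI]
            have hA : PySem.List.insert
                (pvFilt (pvRank plugin) t ++ n0 :: pvFilt (pvRank plugin) r)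
                (0 + ((pvFilt (pvRank plugin) t).length : Int) + 1) plugin
                = pvFilt (pvRank plugin) t ++ n0 :: plugin :: pvFilt (pvRank plugin) r := by
              have e : pvFilt (pvRank plugin) t ++ n0 :: pvFilt (pvRank plugin) r
                  = (pvFilt (pvRank plugin) t ++ [n0]) ++ pvFilt (pvRank plugin) r := by simp
              have e2 : (0 + ((pvFilt (pvRank plugin) t).length : Int) + 1)
                  = (((pvFilt (pvRank plugin) t ++ [n0]).length : Int)) := by
                simp only [List.length_append, List.length_cons, List.length_nil]
                push_cast; ring
              rw [e, e2, pv_insert_mid]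
              simp
            have hB : PySem.List.insert (t ++ n0 :: r) ((t.length : Int) + 1) plugin
                = t ++ n0 :: plugin :: r := by
              have e : t ++ n0 :: r = (t ++ [n0]) ++ r := by simp
              have e2 : ((t.length : Int) + 1) = (((t ++ [n0]).length : Int)) := by
                push_cast; simp
              rw [e, e2, pv_insert_mid]
              simp
            rw [hA, hB, pv_sorted_buckets]
            rcases pvRank_cases plugin with h | h | h | h <;>
              simp [pvFilt, List.filter_append, List.filter_cons, h, hr0.trans h]
      · simp only [ha, ne_eq, not_false_eq_true, if_true, har, and_false, if_neg, if_false]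
        exact happend

-- ===== VERDICT (by name: the statement is the Claim_ definition above) =====
theorem insert_relative_once_py_spec : Claim_equal_insert_relative_once_py := by
  intro current_order plugin anchor position _
  unfold Spec_insert_relative_once_py insert_relative_once_py insert_relative_once_py_alt
  exact pv_core (current_order.filter (fun n => pvKey n != pvKey plugin)) plugin anchor position
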